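-- pv_equiv track=rewrite | github.com/meimeitou/MyAlgorithmTools | tmpdata/t4.py | check
-- ===== SOURCE A (Python) =====
-- def check(inls):
--     if len(inls)<=1:
--         return True
--     else:
--         tps=set([])
--         for x  in zip(inls[:],inls[1:]):
--             tps.add(x[0]-x[1])
--         return True if len(tps)==1 and (1 in tps or -1 in tps) else False
-- ===== SOURCE B (Python) =====
-- def check(inls):
--     if len(inls) <= 1:
--         return True
--     step = inls[1] - inls[0]
--     if step != 1 and step != -1:
--         return False
--     return inls == [inls[0] + step * i for i in range(len(inls))]
-- ===== Notes on version B (the rewrite author's own statement) =====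
-- stated objective: idiomatic
-- what changed: B checks the first step is +/-1 (exiting early when it is not) and compares the list against the expected arithmetic sequence built once, instead of collecting all consecutive differences into a set and inspecting its size and contents.
import Mathlib
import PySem

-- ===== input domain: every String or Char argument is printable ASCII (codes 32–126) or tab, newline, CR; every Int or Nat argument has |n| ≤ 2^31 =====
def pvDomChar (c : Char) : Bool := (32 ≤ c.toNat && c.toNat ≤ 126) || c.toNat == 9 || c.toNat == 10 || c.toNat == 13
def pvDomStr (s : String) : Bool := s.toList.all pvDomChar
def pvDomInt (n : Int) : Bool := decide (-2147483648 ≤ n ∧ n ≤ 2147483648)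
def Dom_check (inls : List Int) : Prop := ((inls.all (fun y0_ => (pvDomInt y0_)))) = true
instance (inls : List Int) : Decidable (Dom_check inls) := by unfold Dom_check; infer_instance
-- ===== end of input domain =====

-- B ("idiomatic"): checks the first step is ±1 and compares the list against the
-- expected arithmetic sequence built once, instead of collecting all consecutive
-- differences into a set and inspecting its size and contents.

-- ===== PORT A =====
def check (inls : List Int) : Bool :=
  if inls.length ≤ 1 then true
  else
    let tps := ((PySem.List.slice inls none none).zip
        (PySem.List.slice inls (some 1) none)).foldl
      (fun s x => PySem.Set.add s (x.1 - x.2)) PySem.Set.empty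
    if PySem.Set.len tps == 1 &&
        (PySem.Set.contains tps 1 || PySem.Set.contains tps (-1)) then true else false

-- ===== PORT B =====
def check_alt (inls : List Int) : Bool :=
  if inls.length ≤ 1 then true
  else
    let step := PySem.List.pyGetD inls 1 0 - PySem.List.pyGetD inls 0 0
    if step != 1 && step != -1 then false
    else
      decide (inls = (PySem.List.pyRange 0 (PySem.List.len inls) 1).map
        (fun i => PySem.List.pyGetD inls 0 0 + step * i))

-- ===== PRECONDITION & SPEC =====
def Spec_check (inls : List Int) (out : Bool) : Prop := out = check_alt inls
instance (inls : List Int) (out : Bool) : Decidable (Spec_check inls out) := by unfold Spec_check; infer_instance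

-- ===== CLAIM (what is proved, stated in full; the proofs are below) =====
def Claim_equal_check : Prop := ∀ (inls : List Int), Dom_check inls → Spec_check inls (check inls)

-- ===== LEMMAS AND PROOFS =====

-- list of consecutive differences a_i - a_{i+1} (A's orientation)
def diffs : List Int → List Int
  | a :: b :: t => (a - b) :: diffs (b :: t)
  | _ => []

theorem zip_tail_diffs (l : List Int) :
    ((l.zip l.tail).map (fun x : Int × Int => x.1 - x.2)) = diffs l := by
  induction l using diffs.induct with
  | case1 a b t ih =>
    simp only [List.tail_cons] at ih ⊢
    simp [diffs, ← ih]
  | case2 l h => cases l with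
    | nil => simp [diffs]
    | cons a t => cases t with
      | nil => simp [diffs]
      | cons b t => exact absurd rfl (h a b t)

-- A's inner test on the set of differences, with the first difference split off
theorem A_inner (d : Int) (ds : List Int) :
    ((PySem.Set.len (PySem.Set.ofList (d :: ds)) == 1) &&
      (PySem.Set.contains (PySem.Set.ofList (d :: ds)) 1 ||
       PySem.Set.contains (PySem.Set.ofList (d :: ds)) (-1)))
    = ((d == 1 || d == -1) && ds.all (· == d)) := by
  by_cases h : ∀ x ∈ ds, x = d
  · have h1 : PySem.Set.discard (PySem.Set.ofList ds) d = [] := by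
      rw [List.eq_nil_iff_forall_not_mem]
      intro x hx
      rw [PySem.Set.mem_discard] at hx
      exact hx.2 (h x ((PySem.Set.mem_ofList _ _).mp hx.1))
    have hall : ds.all (· == d) = true := by
      rw [List.all_eq_true]; intro x hx; exact beq_iff_eq.mpr (h x hx)
    have hc : ∀ c : Int, PySem.Set.contains (PySem.Set.ofList (d :: ds)) c = (c == d) := by
      intro c
      by_cases hcd : c = d
      · subst hcd
        exact ((PySem.Set.contains_iff _ _).mpr
          ((PySem.Set.mem_ofList _ _).mpr (by simp))).trans (beq_self_eq_true c).symm
      · have hno : ¬ PySem.Set.contains (PySem.Set.ofList (d :: ds)) c = true := by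
          intro hc'
          have hmem := (PySem.Set.mem_ofList _ _).mp ((PySem.Set.contains_iff _ _).mp hc')
          rcases List.mem_cons.mp hmem with h' | h'
          · exact hcd h'
          · exact hcd (h c h')
        rw [Bool.eq_false_iff.mpr hno]
        exact (beq_eq_false_iff_ne.mpr hcd).symm
    have hlen : (PySem.Set.len (PySem.Set.ofList (d :: ds)) == 1) = true := by
      rw [PySem.Set.ofList_cons, h1]
      simp [PySem.Set.len]
    rw [hlen, hall, hc 1, hc (-1)]
    simp only [Bool.true_and, Bool.and_true]
    by_cases e1 : d = 1
    · subst e1; simp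
    · by_cases e2 : d = -1
      · subst e2; simp
      · rw [beq_eq_false_iff_ne.mpr (Ne.symm e1), beq_eq_false_iff_ne.mpr (Ne.symm e2),
          beq_eq_false_iff_ne.mpr e1, beq_eq_false_iff_ne.mpr e2]
  · obtain ⟨x, hx, hxd⟩ : ∃ x ∈ ds, x ≠ d := by push Not at h; exact h
    have hmem : x ∈ PySem.Set.discard (PySem.Set.ofList ds) d :=
      (PySem.Set.mem_discard _ _ _).mpr ⟨(PySem.Set.mem_ofList _ _).mpr hx, hxd⟩
    have hlen : (PySem.Set.len (PySem.Set.ofList (d :: ds)) == 1) = false := by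
      rw [beq_eq_false_iff_ne, PySem.Set.ofList_cons]
      have hpos := List.length_pos_of_mem hmem
      simp only [PySem.Set.len, List.length_cons]
      intro hc
      omega
    have hall : ds.all (· == d) = false := by
      rw [Bool.eq_false_iff]
      intro hc'
      exact hxd (by simpa using List.all_eq_true.mp hc' x hx)
    rw [hlen, hall]; simp

-- "the list is the arithmetic sequence with its own head and the given step"
-- iff every consecutive difference a_i - a_{i+1} equals -step
theorem seq_iff (rest : List Int) (a step : Int) :
    ((a :: rest) = (List.range (rest.length + 1)).map (fun i : Nat => a + step * (i : Int)))
    ↔ ((diffs (a :: rest)).all (· == -step) = true) := by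
  induction rest generalizing a with
  | nil => simp [diffs, List.range_one]
  | cons b t ih =>
    have key : ∀ (c : Int), (List.range (t.length + 1 + 1)).map (fun i : Nat => c + step * (i : Int))
        = c :: (List.range (t.length + 1)).map (fun i : Nat => (c + step) + step * (i : Int)) := by
      intro c
      rw [List.range_succ_eq_map, List.map_cons, List.map_map]
      congr 1
      · push_cast; ring
      · apply List.map_congr_left; intro i _
        simp only [Function.comp_apply, Nat.succ_eq_add_one]
        push_cast; ring
    rw [List.length_cons, key a]
    have hd : diffs (a :: b :: t) = (a - b) :: diffs (b :: t) := rfl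
    rw [hd, List.all_cons]
    simp only [List.cons.injEq, true_and]
    by_cases h : b = a + step
    · rw [show a + step = b from h.symm, ih b]
      have h1 : (a - b == -step) = true := by rw [beq_iff_eq]; omega
      rw [h1, Bool.true_and]
    · constructor
      · intro hc
        exfalso
        rw [List.range_succ_eq_map, List.map_cons] at hc
        simp only [List.cons.injEq] at hc
        exact h (by push_cast at hc; omega)
      · intro hc
        exfalso
        have h1 : (a - b == -step) = false := by
          rw [beq_eq_false_iff_ne]; intro hh; exact h (by omega)
        rw [h1, Bool.false_and] at hc
        exact Bool.false_ne_true hc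

theorem check_eq_alt (inls : List Int) : check inls = check_alt inls := by
  match inls with
  | [] => rfl
  | [a] => rfl
  | a :: b :: t =>
    have hlen : ¬ (a :: b :: t).length ≤ 1 := by simp
    simp only [check, check_alt, if_neg hlen, PySem.List.slice_none_none,
      PySem.List.slice_from_one, List.tail_cons]
    have hfold : ((a :: b :: t).zip (a :: b :: t).tail).foldl
        (fun s x => PySem.Set.add s (x.1 - x.2)) PySem.Set.empty
        = PySem.Set.ofList (diffs (a :: b :: t)) := by
      rw [← zip_tail_diffs (a :: b :: t), PySem.Set.ofList_eq_foldl, List.foldl_map]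
      rfl
    simp only [List.tail_cons] at hfold
    rw [hfold]
    rw [show diffs (a :: b :: t) = (a - b) :: diffs (b :: t) from rfl]
    -- B side: indexing and the range comprehension
    have hg0 : PySem.List.pyGetD (a :: b :: t) 0 0 = a := by
      simp [PySem.List.pyGetD, PySem.List.pyGet?, PySem.List.pyIdx?,
        show (0:Int) ≤ (t.length:Int) + 1 from by omega]
    have hg1 : PySem.List.pyGetD (a :: b :: t) 1 0 = b := by
      simp [PySem.List.pyGetD, PySem.List.pyGet?, PySem.List.pyIdx?]
    rw [hg0, hg1]
    have hrange : PySem.List.pyRange 0 (PySem.List.len (a :: b :: t)) 1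
        = (List.range (t.length + 1 + 1)).map (fun k : Nat => (0 : Int) + k) := by
      rw [PySem.List.len_eq, PySem.List.pyRange_one]
      simp
      rw [show ((t.length : Int) + 1 + 1).toNat = t.length + 1 + 1 from by omega]
    rw [hrange, List.map_map]
    have hmap : ((List.range (t.length + 1 + 1)).map
        ((fun i => a + (b - a) * i) ∘ (fun k : Nat => (0 : Int) + k)))
        = (List.range (t.length + 1 + 1)).map (fun i : Nat => a + (b - a) * (i : Int)) := by
      apply List.map_congr_left; intro i _; simp
    rw [hmap]
    -- convert B's decide via seq_iff
    have hB : decide ((a :: b :: t) =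
        (List.range (t.length + 1 + 1)).map (fun i : Nat => a + (b - a) * (i : Int)))
        = (diffs (a :: b :: t)).all (· == -(b - a)) := by
      have := seq_iff (b :: t) a (b - a)
      simp only [List.length_cons] at this
      rw [decide_eq_decide.mpr this]
      exact Bool.decide_coe _
    rw [hB, show -(b - a) = a - b from by ring,
      show diffs (a :: b :: t) = (a - b) :: diffs (b :: t) from rfl, List.all_cons,
      show ((a - b) == (a - b)) = true from by simp, Bool.true_and]
    rw [show ∀ c : Bool, (if c = true then true else false) = c from fun c => by cases c <;> rfl]
    rw [A_inner]
    by_cases h1 : b - a = 1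
    · have e : a - b = -1 := by omega
      simp [h1, e]
    · by_cases h2 : b - a = -1
      · have e : a - b = 1 := by omega
        simp [h2, e]
      · have e1 : a - b ≠ 1 := by omega
        have e2 : a - b ≠ -1 := by omega
        simp [h1, h2, e1, e2]

-- ===== VERDICT (by name: the statement is the Claim_ definition above) =====
theorem check_spec : Claim_equal_check := by
  intro inls _
  unfold Spec_check
  exact check_eq_alt inls
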